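-- pv_equiv track=rewrite | github.com/MrBrantCode/unitest_baseline | mut_generate/mist_train_cf/cf_3259/solution.py | findMaxSubstring
-- ===== SOURCE A (Python) =====
-- def findMaxSubstring(s):
--     """
--     Finds the maximum substring with a prime length and contains only unique characters in a given string.
--
--     Args:
--     s (str): The input string.
--
--     Returns:
--     str: The maximum substring that meets the conditions.
--     """
--
--     def is_prime(n):
--         """Checks if a number is prime."""
--         if n < 2:
--             return False
--         for i in range(2, int(n**0.5) + 1):
--             if n % i == 0:
--                 return False
--         return True
--
--     def is_unique(substring):
--         """Checks if a substring contains only unique characters."""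
--         return len(substring) == len(set(substring))
--
--     max_length = 0
--     max_substring = ""
--     for length in range(2, len(s) + 1):
--         if is_prime(length):
--             for i in range(len(s) - length + 1):
--                 substring = s[i:i + length]
--                 if is_unique(substring) and length > max_length:
--                     max_length = length
--                     max_substring = substring
--
--     return max_substring
-- ===== SOURCE B (Python) =====
-- def findMaxSubstring(s):
--     """Finds the maximum substring with a prime length and only unique characters.
--
--     Single pass over start positions computing, for each start i, the length of the
--     longest duplicate-free run starting at i; then the answer is the first run that
--     accommodates the largest prime not exceeding the longest run.
--     """
--     n = len(s)
--     # runs[i] = length of the longest duplicate-free prefix of s[i:]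
--     runs = []
--     for i in range(n):
--         seen = set()
--         j = i
--         while j < n and s[j] not in seen:
--             seen.add(s[j])
--             j += 1
--         runs.append(j - i)
--     m = max(runs, default=0)
--     # largest prime p <= m (p >= 2), found by descending trial division
--     p = m
--     while p >= 2:
--         d = 2
--         while d * d <= p:
--             if p % d == 0:
--                 break
--             d += 1
--         else:
--             break
--         p -= 1
--     if p < 2:
--         return ""
--     for i in range(n):
--         if runs[i] >= p:
--             return s[i:i + p]
--     return ""
-- ===== Notes on version B (the rewrite author's own statement) =====
-- stated objective: faster
-- what changed: Replaces A's triple loop (every prime length x every window x a set build per window) by one pass computing the longest duplicate-free run at each start index, then a single descending prime search from the maximal run and one scan for the first run long enough.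
import Mathlib
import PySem

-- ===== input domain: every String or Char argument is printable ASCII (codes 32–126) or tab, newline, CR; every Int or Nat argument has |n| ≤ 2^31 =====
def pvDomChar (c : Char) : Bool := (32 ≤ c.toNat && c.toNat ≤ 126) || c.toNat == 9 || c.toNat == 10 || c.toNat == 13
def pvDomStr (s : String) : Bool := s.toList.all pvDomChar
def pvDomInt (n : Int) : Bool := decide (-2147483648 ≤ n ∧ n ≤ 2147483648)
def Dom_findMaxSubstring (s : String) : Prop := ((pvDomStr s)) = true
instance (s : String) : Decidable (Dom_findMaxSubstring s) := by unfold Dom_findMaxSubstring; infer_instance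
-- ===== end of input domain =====

-- B replaces A's triple loop over prime lengths and windows by one pass computing, per start
-- index, the longest duplicate-free run, then one prime search and one scan (objective: faster).

-- ===== PORT A =====
-- is_prime: 'int(n**0.5)' is ported as Nat.sqrt, the exact integer square root (exact on the admitted sizes)
def pvIsPrimeA (n : Nat) : Bool :=
  if n < 2 then false
  else (List.range' 2 (Nat.sqrt n + 1 - 2)).all (fun i => !(n % i == 0))

-- is_unique: len(substring) == len(set(substring))
def pvIsUnique (sub : List Char) : Bool := sub.length == (PySem.Set.ofList sub).length

-- s[i:i+length] with 0 ≤ i and i+length ≤ len(s) is ported as (drop i).take length (exact here)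
def findMaxSubstring (s : String) : String :=
  let l := s.toList
  let res :=
    (List.range' 2 (l.length + 1 - 2)).foldl
      (fun acc length =>
        if pvIsPrimeA length then
          (List.range (l.length - length + 1)).foldl
            (fun acc2 i =>
              let substring := (l.drop i).take length
              if pvIsUnique substring && decide (acc2.1 < length) then (length, substring)
              else acc2)
            acc
        else acc)
      ((0 : Nat), ([] : List Char))
  String.ofList res.2

-- ===== PORT B =====
-- the inner 'while j < n and s[j] not in seen' scan, on the suffix starting at the current index
def pvRunFrom (l : List Char) (seen : PySem.Set Char) : Nat :=
  match l with
  | [] => 0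
  | c :: rest => if seen.contains c then 0 else pvRunFrom rest (seen.add c) + 1

-- the 'while d*d <= p' trial-division loop (for-else: prime when no divisor found)
def pvTrial (p d : Nat) : Bool :=
  if _h : d * d ≤ p then
    if p % d == 0 then false else pvTrial p (d + 1)
  else true
termination_by p + 2 - d
decreasing_by
  have hd : d ≤ p + 1 := by
    rcases Nat.eq_zero_or_pos d with h | h
    · omega
    · have := Nat.le_mul_of_pos_left d h; omega
  omega

-- 'p = m; while p >= 2 and not prime(p): p -= 1'
def pvDescPrime (p : Nat) : Nat :=
  if _h : p < 2 then p
  else if pvTrial p 2 then p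
  else pvDescPrime (p - 1)

def findMaxSubstring_alt (s : String) : String :=
  let l := s.toList
  let n := l.length
  let runs := (List.range n).map (fun i => pvRunFrom (l.drop i) PySem.Set.empty)
  let m := runs.foldl max 0
  let p := pvDescPrime m
  if p < 2 then ""
  else
    match (List.range n).find? (fun i => decide (p ≤ runs.getD i 0)) with
    | some i => String.ofList ((l.drop i).take p)
    | none => ""

-- ===== PRECONDITION & SPEC =====
def Spec_findMaxSubstring (s : String) (out : String) : Prop := out = findMaxSubstring_alt s
instance (s : String) (out : String) : Decidable (Spec_findMaxSubstring s out) := by unfold Spec_findMaxSubstring; infer_instance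

-- ===== CLAIM (what is proved, stated in full; the proofs are below) =====
def Claim_equal_findMaxSubstring : Prop := ∀ (s : String), Dom_findMaxSubstring s → Spec_findMaxSubstring s (findMaxSubstring s)

-- ===== LEMMAS AND PROOFS =====

-- proof-side abbreviations
def pvRun (l : List Char) (i : Nat) : Nat := pvRunFrom (l.drop i) PySem.Set.empty
def pvFirstIdx (l : List Char) (L : Nat) : Option Nat :=
  (List.range (l.length - L + 1)).find? (fun i => pvIsUnique ((l.drop i).take L))
def pvAct (l : List Char) (L : Nat) : Bool := pvIsPrimeA L && (pvFirstIdx l L).isSome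
def pvDescFind (q : Nat → Bool) (k : Nat) : Option Nat :=
  if _h : k < 2 then none
  else if q k then some k else pvDescFind q (k - 1)

-- generic list fact (no Mathlib name found for find? congruence)
lemma pv_find?_congr {α : Type} (p q : α → Bool) (xs : List α)
    (h : ∀ x ∈ xs, p x = q x) : xs.find? p = xs.find? q := by
  induction xs with
  | nil => rfl
  | cons x xs ih =>
    simp only [List.find?]
    rw [h x (by simp)]
    cases q x
    · exact ih (fun y hy => h y (by simp [hy]))
    · rfl

-- 1. uniqueness test is Nodup
lemma pvIsUnique_iff (sub : List Char) : pvIsUnique sub = true ↔ sub.Nodup := by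
  unfold pvIsUnique
  rw [beq_iff_eq]
  induction sub with
  | nil => simp
  | cons x xs ih =>
    rw [PySem.Set.ofList_cons]
    constructor
    · intro h
      simp only [List.length_cons] at h
      have h2 : (PySem.Set.ofList xs).length ≤ xs.length := PySem.Set.length_ofList_le xs
      have h1 : ((PySem.Set.ofList xs).discard x).length ≤ (PySem.Set.ofList xs).length :=
        List.length_filter_le ..
      have hd : ((PySem.Set.ofList xs).discard x).length = (PySem.Set.ofList xs).length := by omega
      have ho : (PySem.Set.ofList xs).length = xs.length := by omega
      have hall := List.length_filter_eq_length_iff.mp hd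
      refine List.nodup_cons.mpr ⟨fun hx => ?_, ih.mp ho.symm⟩
      have := hall x ((PySem.Set.mem_ofList xs x).mpr hx)
      simp at this
    · intro hnd
      rcases List.nodup_cons.mp hnd with ⟨hx, hnd'⟩
      rw [PySem.Set.ofList_eq_self_of_nodup xs hnd']
      have hfil : List.filter (fun y => !y == x) xs = xs := List.filter_eq_self.mpr (by
        intro a ha
        simp only [Bool.not_eq_eq_eq_not, Bool.not_true, beq_eq_false_iff_ne, ne_eq]
        exact fun he => hx (he ▸ ha))
      simp only [PySem.Set.discard, hfil, List.length_cons]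

-- 2. run length bounded by the suffix length
lemma pvRunFrom_le (l : List Char) (S : PySem.Set Char) : pvRunFrom l S ≤ l.length := by
  induction l generalizing S with
  | nil => simp [pvRunFrom]
  | cons c rest ih =>
    unfold pvRunFrom
    split
    · omega
    · simpa using ih (S.add c)

-- 3. characterisation of the run length
lemma pvRunFrom_iff (l : List Char) (S : PySem.Set Char) (L : Nat) (hL : L ≤ l.length) :
    L ≤ pvRunFrom l S ↔ (l.take L).Nodup ∧ ∀ c ∈ l.take L, c ∉ S := by
  induction l generalizing S L with
  | nil =>
    simp only [List.length_nil, Nat.le_zero] at hL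
    subst hL
    simp [pvRunFrom]
  | cons c rest ih =>
    cases L with
    | zero => simp
    | succ L =>
      simp only [List.take_succ_cons, List.nodup_cons, List.mem_cons]
      unfold pvRunFrom
      by_cases hc : c ∈ S
      · rw [if_pos ((PySem.Set.contains_iff S c).mpr hc)]
        constructor
        · intro hle; omega
        · rintro ⟨-, hall⟩
          exact absurd hc (hall c (Or.inl rfl))
      · rw [if_neg (by
          intro hcon
          exact hc ((PySem.Set.contains_iff S c).mp hcon))]
        rw [Nat.succ_le_succ_iff]
        rw [ih (S.add c) L (by simpa using hL)]
        constructor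
        · rintro ⟨hnd, hall⟩
          refine ⟨⟨fun hm => ?_, hnd⟩, fun a ha => ?_⟩
          · exact (hall c hm) ((PySem.Set.mem_add S c c).mpr (Or.inr rfl))
          · rcases ha with rfl | ha
            · exact hc
            · exact fun hs => (hall a ha) ((PySem.Set.mem_add S c a).mpr (Or.inl hs))
        · rintro ⟨⟨hcm, hnd⟩, hall⟩
          refine ⟨hnd, fun a ha hs => ?_⟩
          rcases (PySem.Set.mem_add S c a).mp hs with h | rfl
          · exact (hall a (Or.inr ha)) h
          · exact hcm ha

-- 4. A's primality test
lemma pvIsPrimeA_iff (n : Nat) : pvIsPrimeA n = true ↔ Nat.Prime n := by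
  unfold pvIsPrimeA
  split
  · rename_i h
    simp only [Bool.false_eq_true, false_iff]
    exact fun hp => absurd hp.two_le (by omega)
  · rename_i h
    rw [List.all_eq_true, Nat.prime_def_le_sqrt]
    constructor
    · intro hall
      refine ⟨by omega, fun m h2 hsq hdvd => ?_⟩
      have hm : m ∈ List.range' 2 (Nat.sqrt n + 1 - 2) := by
        rw [List.mem_range'_1]
        have h1 : 1 ≤ Nat.sqrt n := Nat.le_sqrt.mpr (by omega)
        omega
      have hmod : n % m = 0 := Nat.dvd_iff_mod_eq_zero.mp hdvd
      have := hall m hm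
      simp [hmod] at this
    · rintro ⟨-, hmax⟩ m hm
      rw [List.mem_range'_1] at hm
      rw [Bool.not_eq_true', beq_eq_false_iff_ne]
      intro hmod
      exact hmax m hm.1 (by omega) (Nat.dvd_iff_mod_eq_zero.mpr hmod)

-- 5. B's primality test agrees with A's on n ≥ 2
lemma pvTrial_iff_aux (p k : Nat) :
    ∀ d, 2 ≤ d → p + 2 - d ≤ k →
      (pvTrial p d = true ↔ ∀ m, d ≤ m → m * m ≤ p → ¬ m ∣ p) := by
  induction k with
  | zero =>
    intro d hd hk
    unfold pvTrial
    rw [dif_neg (by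
      intro hdp
      have hdd : d ≤ d * d := Nat.le_mul_of_pos_left d (by omega)
      omega)]
    simp only [true_iff]
    intro m hm hmp hdvd
    have hmm : m ≤ m * m := Nat.le_mul_of_pos_left m (by omega)
    omega
  | succ k ih =>
    intro d hd hk
    unfold pvTrial
    split
    · rename_i hdp
      split
      · rename_i hmod
        simp only [Bool.false_eq_true, false_iff]
        intro hall
        exact (hall d (le_refl d) hdp) (Nat.dvd_of_mod_eq_zero (by simpa using hmod))
      · rename_i hmod
        rw [ih (d + 1) (by omega) (by omega)]
        constructor
        · intro hrec m hm hmp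
          rcases Nat.eq_or_lt_of_le hm with rfl | h2
          · intro hdvd
            exact hmod (by simp [Nat.dvd_iff_mod_eq_zero.mp hdvd])
          · exact hrec m (by omega) hmp
        · intro hall m hm hmp
          exact hall m (by omega) hmp
    · rename_i hdp
      simp only [true_iff]
      intro m hm hmp hdvd
      have hmm : d * d ≤ m * m := Nat.mul_le_mul hm hm
      omega

lemma pvTrial_eq (n : Nat) (hn : 2 ≤ n) : pvTrial n 2 = pvIsPrimeA n := by
  rw [Bool.eq_iff_iff, pvTrial_iff_aux n (n + 2) 2 (by omega) (by omega),
    pvIsPrimeA_iff, Nat.prime_def_le_sqrt]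
  constructor
  · intro h
    exact ⟨hn, fun m h2 hsq => h m h2 (Nat.le_sqrt.mp hsq)⟩
  · rintro ⟨-, h⟩ m hm hmp
    exact h m hm (Nat.le_sqrt.mpr hmp)

-- 6. inner fold of A = first unique window of this length
lemma pv_inner_stuck (l : List Char) (L : Nat) (is : List Nat) (acc : Nat × List Char)
    (h : ¬ acc.1 < L) :
    is.foldl
      (fun acc2 i =>
        if pvIsUnique ((l.drop i).take L) && decide (acc2.1 < L) then (L, (l.drop i).take L)
        else acc2)
      acc = acc := by
  induction is with
  | nil => rfl
  | cons i is ih =>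
    rw [List.foldl_cons, if_neg (by simp [h])]
    exact ih

lemma pv_inner_fold (l : List Char) (L : Nat) (is : List Nat) (acc : Nat × List Char)
    (hacc : acc.1 < L) :
    is.foldl
      (fun acc2 i =>
        if pvIsUnique ((l.drop i).take L) && decide (acc2.1 < L) then (L, (l.drop i).take L)
        else acc2)
      acc
    = match is.find? (fun i => pvIsUnique ((l.drop i).take L)) with
      | some i => (L, (l.drop i).take L)
      | none => acc := by
  induction is generalizing acc with
  | nil => rfl
  | cons i is ih =>
    cases hu : pvIsUnique ((l.drop i).take L) with
    | true =>
      rw [List.foldl_cons, if_pos (by simp [hu, hacc]),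
        pv_inner_stuck l L is _ (by simp), List.find?_cons_of_pos (by simpa using hu)]
    | false =>
      rw [List.foldl_cons, if_neg (by simp [hu]), ih acc hacc,
        List.find?_cons_of_neg (by simp [hu])]

-- 7. outer fold of A = last active length, i.e. first active length of the reversed range
lemma pv_outer_fold (l : List Char) (ls : List Nat) (acc : Nat × List Char)
    (h : ∀ L ∈ ls, acc.1 < L) (hp : ls.Pairwise (· < ·)) :
    ls.foldl
      (fun acc L =>
        if pvIsPrimeA L then
          (List.range (l.length - L + 1)).foldl
            (fun acc2 i =>
              let substring := (l.drop i).take L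
              if pvIsUnique substring && decide (acc2.1 < L) then (L, substring) else acc2)
            acc
        else acc)
      acc
    = match ls.reverse.find? (pvAct l) with
      | some L => (L, (l.drop ((pvFirstIdx l L).getD 0)).take L)
      | none => acc := by
  induction ls generalizing acc with
  | nil => rfl
  | cons L ls ih =>
    have hL : acc.1 < L := h L (by simp)
    rcases List.pairwise_cons.mp hp with ⟨hlt, hp'⟩
    rw [List.foldl_cons, List.reverse_cons, List.find?_append]
    by_cases hP : pvIsPrimeA L = true
    · rw [if_pos hP, pv_inner_fold l L _ acc hL]
      cases hFI : (List.range (l.length - L + 1)).find? (fun i => pvIsUnique ((l.drop i).take L)) with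
      | some i =>
        rw [ih (L, (l.drop i).take L) (fun L' hL' => hlt L' hL') hp']
        have hact : pvAct l L = true := by
          simp [pvAct, hP, pvFirstIdx, hFI]
        cases hf : ls.reverse.find? (pvAct l) with
        | some L' => rfl
        | none =>
          simp only [Option.none_or]
          rw [List.find?_cons_of_pos (by simpa using hact)]
          simp [pvFirstIdx, hFI]
      | none =>
        rw [ih acc (fun L' hL' => h L' (List.mem_cons_of_mem _ hL')) hp']
        have hact : pvAct l L = false := by
          simp [pvAct, hP, pvFirstIdx, hFI]
        cases hf : ls.reverse.find? (pvAct l) with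
        | some L' => rfl
        | none => simp [hact]
    · rw [if_neg hP, ih acc (fun L' hL' => h L' (List.mem_cons_of_mem _ hL')) hp']
      have hact : pvAct l L = false := by simp [pvAct, hP]
      cases hf : ls.reverse.find? (pvAct l) with
      | some L' => rfl
      | none => simp [hact]

-- 8. reversed ascending range searched = descending search
lemma pv_find_rev_range' (q : Nat → Bool) (k : Nat) :
    ((List.range' 2 (k + 1 - 2)).reverse.find? q) = pvDescFind q k := by
  induction k with
  | zero =>
    unfold pvDescFind
    rw [dif_pos (by omega)]
    rfl
  | succ k ih =>
    by_cases hk : k + 1 < 2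
    · unfold pvDescFind
      rw [dif_pos hk]
      have hk0 : k = 0 := by omega
      subst hk0
      rfl
    · have hk1 : 1 ≤ k := by omega
      have hrange : List.range' 2 (k + 1 + 1 - 2) = List.range' 2 (k - 1) ++ [k + 1] := by
        have h1 : k + 1 + 1 - 2 = (k - 1) + 1 := by omega
        rw [h1, List.range'_concat]
        congr 1
        simp
        omega
      rw [hrange, List.reverse_append, List.reverse_singleton, List.singleton_append,
        List.find?_cons]
      unfold pvDescFind
      rw [dif_neg hk]
      cases hq : q (k + 1) with
      | true => rfl
      | false => simpa using ih

-- 9. descending search characterisations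
lemma pvDescFind_eq_some (q : Nat → Bool) (k p : Nat) :
    pvDescFind q k = some p ↔ 2 ≤ p ∧ p ≤ k ∧ q p = true ∧ ∀ L, p < L → L ≤ k → q L = false := by
  induction k with
  | zero =>
    unfold pvDescFind
    rw [dif_pos (by omega)]
    constructor
    · intro hc; cases hc
    · rintro ⟨h1, h2, -⟩; omega
  | succ k ih =>
    unfold pvDescFind
    by_cases hk : k + 1 < 2
    · rw [dif_pos hk]
      constructor
      · intro hc; cases hc
      · rintro ⟨h1, h2, -⟩; omega
    · rw [dif_neg hk]
      cases hq : q (k + 1) with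
      | true =>
        simp only [if_true]
        constructor
        · rintro ⟨rfl⟩
          exact ⟨by omega, le_refl _, hq, fun L h1 h2 => by omega⟩
        · rintro ⟨h1, h2, h3, h4⟩
          rcases Nat.eq_or_lt_of_le h2 with rfl | hlt
          · rfl
          · exact absurd hq (by rw [h4 (k + 1) hlt (le_refl _)]; simp)
      | false =>
        simp only [Bool.false_eq_true, if_false]
        rw [show k + 1 - 1 = k from rfl, ih]
        constructor
        · rintro ⟨h1, h2, h3, h4⟩
          refine ⟨h1, by omega, h3, fun L hL1 hL2 => ?_⟩
          rcases Nat.eq_or_lt_of_le hL2 with rfl | hlt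
          · exact hq
          · exact h4 L hL1 (by omega)
        · rintro ⟨h1, h2, h3, h4⟩
          refine ⟨h1, ?_, h3, fun L hL1 hL2 => h4 L hL1 (by omega)⟩
          rcases Nat.eq_or_lt_of_le h2 with rfl | hlt
          · rw [hq] at h3; cases h3
          · omega

lemma pvDescFind_eq_none (q : Nat → Bool) (k : Nat) :
    pvDescFind q k = none ↔ ∀ L, 2 ≤ L → L ≤ k → q L = false := by
  induction k with
  | zero =>
    unfold pvDescFind
    rw [dif_pos (by omega)]
    simp only [true_iff]
    intro L h1 h2
    omega
  | succ k ih =>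
    unfold pvDescFind
    by_cases hk : k + 1 < 2
    · rw [dif_pos hk]
      simp only [true_iff]
      intro L h1 h2
      omega
    · rw [dif_neg hk]
      cases hq : q (k + 1) with
      | true =>
        simp only [if_true, reduceCtorEq, false_iff]
        intro hall
        rw [hall (k + 1) (by omega) (le_refl _)] at hq
        cases hq
      | false =>
        simp only [Bool.false_eq_true, if_false]
        rw [show k + 1 - 1 = k from rfl, ih]
        constructor
        · intro hall L h1 h2
          rcases Nat.eq_or_lt_of_le h2 with rfl | hlt
          · exact hq
          · exact hall L h1 (by omega)
        · intro hall L h1 h2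
          exact hall L h1 (by omega)

lemma pvDescFind_congr (q q' : Nat → Bool) (k : Nat) (h : ∀ L, 2 ≤ L → L ≤ k → q L = q' L) :
    pvDescFind q k = pvDescFind q' k := by
  induction k with
  | zero =>
    unfold pvDescFind
    rw [dif_pos (by omega), dif_pos (by omega)]
  | succ k ih =>
    unfold pvDescFind
    by_cases hk : k + 1 < 2
    · rw [dif_pos hk, dif_pos hk]
    · rw [dif_neg hk, dif_neg hk, h (k + 1) (by omega) (le_refl _),
        show k + 1 - 1 = k from rfl,
        ih (fun L h1 h2 => h L h1 (by omega))]

-- 10. the bounded search collapses to a search up to the bound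
lemma pvDescFind_bound (q : Nat → Bool) (m n : Nat) (h : m ≤ n) :
    pvDescFind (fun L => q L && decide (L ≤ m)) n = pvDescFind q m := by
  cases hx : pvDescFind q m with
  | none =>
    rw [pvDescFind_eq_none]
    rw [pvDescFind_eq_none] at hx
    intro L h1 h2
    by_cases hLm : L ≤ m
    · simp [hx L h1 hLm]
    · simp [hLm]
  | some p =>
    rw [pvDescFind_eq_some]
    rw [pvDescFind_eq_some] at hx
    rcases hx with ⟨h1, h2, h3, h4⟩
    refine ⟨h1, by omega, by simp [h3, h2], fun L hL1 hL2 => ?_⟩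
    by_cases hLm : L ≤ m
    · simp [h4 L hL1 hLm]
    · simp [hLm]

-- 11. B's descending prime loop via pvDescFind
lemma pvDescPrime_eq (m : Nat) :
    pvDescPrime m = match pvDescFind (fun p => pvTrial p 2) m with
      | some p => p
      | none => if m < 2 then m else 1 := by
  induction m with
  | zero =>
    unfold pvDescPrime pvDescFind
    rw [dif_pos (by omega), dif_pos (by omega)]
    simp
  | succ m ih =>
    unfold pvDescPrime pvDescFind
    by_cases hk : m + 1 < 2
    · rw [dif_pos hk, dif_pos hk]
      simp [hk]
    · rw [dif_neg hk, dif_neg hk]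
      cases hq : pvTrial (m + 1) 2 with
      | true => rfl
      | false =>
        simp only [Bool.false_eq_true, if_false]
        rw [show m + 1 - 1 = m from rfl, ih]
        cases hd : pvDescFind (fun p => pvTrial p 2) m with
        | some p => rfl
        | none =>
          by_cases hm : m < 2
          · simp only [if_pos hm, if_neg hk]
            omega
          · simp only [if_neg hm, if_neg hk]

-- main theorem body
lemma pv_main (s : String) : findMaxSubstring s = findMaxSubstring_alt s := by
  simp only [findMaxSubstring, findMaxSubstring_alt]
  generalize s.toList = l
  rw [pv_outer_fold l (List.range' 2 (l.length + 1 - 2)) (0, [])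
      (fun L hL => by rw [List.mem_range'_1] at hL; omega)
      (List.pairwise_lt_range' 1)]
  rw [pv_find_rev_range' (pvAct l) l.length]
  have hruns : (fun i => pvRunFrom (l.drop i) PySem.Set.empty) = fun i => pvRun l i := rfl
  rw [hruns]
  set m := ((List.range l.length).map fun i => pvRun l i).foldl max 0 with hm
  have hrun_le : ∀ i, pvRun l i ≤ l.length - i := by
    intro i
    have h := pvRunFrom_le (l.drop i) PySem.Set.empty
    simpa [pvRun] using h
  have hmle : m ≤ l.length := by
    rcases PySem.List.foldl_max_mem ((List.range l.length).map fun i => pvRun l i) 0 with h | h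
    · omega
    · rcases List.mem_map.mp h with ⟨i, hi, hrw⟩
      have := hrun_le i
      omega
  have hempty : ∀ c : Char, c ∉ (PySem.Set.empty : PySem.Set Char) := by
    intro c hc
    cases hc
  have hwin : ∀ L, 2 ≤ L → L ≤ l.length → ((pvFirstIdx l L).isSome = true ↔ L ≤ m) := by
    intro L h2 hn
    unfold pvFirstIdx
    rw [List.find?_isSome]
    constructor
    · rintro ⟨i, hi, hu⟩
      rw [List.mem_range] at hi
      have hiL : i ≤ l.length - L := by omega
      have hLd : L ≤ (l.drop i).length := by simp; omega
      have hrun : L ≤ pvRun l i := by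
        rw [pvRun, pvRunFrom_iff (l.drop i) PySem.Set.empty L hLd]
        exact ⟨(pvIsUnique_iff _).mp hu, fun c _ => hempty c⟩
      have hmem : pvRun l i ∈ (List.range l.length).map fun i => pvRun l i :=
        List.mem_map.mpr ⟨i, List.mem_range.mpr (by omega), rfl⟩
      have := (PySem.List.le_foldl_max ((List.range l.length).map fun i => pvRun l i) 0).2 _ hmem
      omega
    · intro hLm
      have hm0 : 0 < m := by omega
      rcases PySem.List.foldl_max_mem ((List.range l.length).map fun i => pvRun l i) 0 with h | h
      · omega
      · rcases List.mem_map.mp h with ⟨i, hi, hrw⟩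
        rw [List.mem_range] at hi
        have hri : L ≤ pvRun l i := by omega
        have h1 := hrun_le i
        have hLd : L ≤ (l.drop i).length := by simp; omega
        refine ⟨i, List.mem_range.mpr (by omega), ?_⟩
        rw [pvRun, pvRunFrom_iff (l.drop i) PySem.Set.empty L hLd] at hri
        exact (pvIsUnique_iff _).mpr hri.1
  have hchain : pvDescFind (pvAct l) l.length = pvDescFind (fun p => pvTrial p 2) m := by
    rw [pvDescFind_congr (pvAct l) (fun L => pvIsPrimeA L && decide (L ≤ m)) l.length
        (fun L h1 h2 => by
          unfold pvAct
          congr 1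
          rw [Bool.eq_iff_iff, decide_eq_true_eq]
          exact hwin L h1 h2)]
    rw [pvDescFind_bound pvIsPrimeA m l.length hmle]
    exact pvDescFind_congr _ _ m (fun L h1 h2 => (pvTrial_eq L h1).symm)
  rw [pvDescPrime_eq m, ← hchain]
  cases hD : pvDescFind (pvAct l) l.length with
  | none =>
    have hmlt : m < 2 := by
      by_contra hge
      have h22 : pvTrial 2 2 = true := by
        rw [pvTrial_eq 2 (le_refl 2), pvIsPrimeA_iff]
        exact Nat.prime_two
      have hnone := (pvDescFind_eq_none _ m).mp (hchain ▸ hD) 2 (le_refl 2) (by omega)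
      rw [h22] at hnone
      cases hnone
    dsimp only
    split
    · rfl
    · omega
  | some p =>
    rcases (pvDescFind_eq_some (pvAct l) l.length p).mp hD with ⟨h2p, hpn, hact, -⟩
    dsimp only
    rw [if_neg (by omega)]
    rcases Option.isSome_iff_exists.mp (by
      unfold pvAct at hact
      exact (Bool.and_eq_true ..).mp hact |>.2) with ⟨istar, hFI⟩
    have hsplit : List.range l.length
        = List.range (l.length - p + 1) ++ (List.range (p - 1)).map (fun x => (l.length - p + 1) + x) := by
      rw [← List.range_add]
      congr 1
      omega
    have hgetd : (List.range l.length).find? (fun i => decide (p ≤ ((List.range l.length).map fun i => pvRun l i).getD i 0))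
        = (List.range l.length).find? (fun i => decide (p ≤ pvRun l i)) := by
      apply pv_find?_congr
      intro i hi
      rw [List.mem_range] at hi
      rw [PySem.List.getD_map_range _ _ _ _ hi]
    rw [hgetd, hsplit, List.find?_append]
    have htail : ((List.range (p - 1)).map (fun x => (l.length - p + 1) + x)).find?
        (fun i => decide (p ≤ pvRun l i)) = none := by
      rw [List.find?_eq_none]
      intro x hx
      rcases List.mem_map.mp hx with ⟨j, hj, hrw⟩
      have := hrun_le x
      simp only [decide_eq_true_eq]
      omega
    rw [htail, Option.or_none]
    have hhead : (List.range (l.length - p + 1)).find? (fun i => decide (p ≤ pvRun l i))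
        = (List.range (l.length - p + 1)).find? (fun i => pvIsUnique ((l.drop i).take p)) := by
      apply pv_find?_congr
      intro i hi
      rw [List.mem_range] at hi
      have hLd : p ≤ (l.drop i).length := by simp; omega
      rw [Bool.eq_iff_iff, decide_eq_true_eq, pvRun, pvRunFrom_iff (l.drop i) PySem.Set.empty p hLd,
        pvIsUnique_iff]
      constructor
      · exact fun h => h.1
      · exact fun h => ⟨h, fun c _ => hempty c⟩
    rw [hhead]
    rw [show (List.range (l.length - p + 1)).find? (fun i => pvIsUnique ((l.drop i).take p)) = pvFirstIdx l p from rfl, hFI]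
    rfl

-- ===== VERDICT (by name: the statement is the Claim_ definition above) =====
theorem findMaxSubstring_spec : Claim_equal_findMaxSubstring := by
  intro s _
  show _ = _
  exact pv_main s
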